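-- pv_equiv track=rewrite | github.com/Luoimo/Kant | backend/rag/extracter/pdf_extractor.py | build_page_section_map
-- ===== SOURCE A (Python) =====
-- TOCEntry = tuple[int, str, int]
--
-- def build_page_section_map(
--     toc: list[TOCEntry],
--     total_pages: int,
-- ) -> dict[int, tuple[str, str]]:
--     """
--     根据目录 TOC 为每一页生成 (章标题, 节标题)。
--
--     - 章：层级为 1 的最后一个起始页 <= 当前页的条目
--     - 节：任意层级的最后一个起始页 <= 当前页的条目（通常比章更细）
--     - 无 TOC 或某页之前无条目时返回 ("", "")。
--     """
--     if not toc: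
--         return {p: ("", "") for p in range(1, total_pages + 1)}
--
--     # 归一化为 (lvl, title, page)，保证 page 有效
--     entries: list[tuple[int, str, int]] = []
--     for item in toc:
--         if len(item) < 3:
--             continue
--         lvl, title, page = int(item[0]), str(item[1]).strip(), int(item[2])
--         if page < 1 or page > total_pages:
--             continue
--         entries.append((lvl, title, page))
--
--     result: dict[int, tuple[str, str]] = {}
--     for page_no in range(1, total_pages + 1):
--         chapter_title = ""
--         section_title = ""
--         for lvl, title, start_page in entries:
--             if start_page <= page_no:
--                 if lvl == 1:
--                     chapter_title = title
--                 section_title = title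
--         result[page_no] = (chapter_title, section_title)
--     return result
-- ===== SOURCE B (Python) =====
-- def build_page_section_map(
--     toc,
--     total_pages,
-- ):
--     # One pass over the TOC to index, per start page, the last entry starting
--     # there (and the last level-1 entry), then one sweep over the pages
--     # carrying the current best (latest-in-TOC) chapter/section.
--     sec_at = {}   # start_page -> (toc index, title) of the last entry starting there
--     chap_at = {}  # same, restricted to level-1 entries
--     for i, item in enumerate(toc):
--         if len(item) < 3:
--             continue
--         lvl, title, page = int(item[0]), str(item[1]).strip(), int(item[2])
--         if 1 <= page <= total_pages:
--             sec_at[page] = (i, title)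
--             if lvl == 1:
--                 chap_at[page] = (i, title)
--     result = {}
--     cs = (-1, "")  # current section: (toc index, title); sentinel index -1
--     cc = (-1, "")  # current chapter
--     for p in range(1, total_pages + 1):
--         v = sec_at.get(p)
--         if v is not None and v[0] > cs[0]:
--             cs = v
--         w = chap_at.get(p)
--         if w is not None and w[0] > cc[0]:
--             cc = w
--         result[p] = (cc[1], cs[1])
--     return result
-- ===== Notes on version B (the rewrite author's own statement) =====
-- stated objective: faster
-- what changed: Instead of rescanning the whole TOC for every page, B indexes in one pass, per start page, the last TOC entry (and last level-1 entry) starting there, then sweeps the pages once carrying the current latest-in-TOC chapter/section via an index comparison (a prefix-max of TOC indices).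
import Mathlib
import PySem

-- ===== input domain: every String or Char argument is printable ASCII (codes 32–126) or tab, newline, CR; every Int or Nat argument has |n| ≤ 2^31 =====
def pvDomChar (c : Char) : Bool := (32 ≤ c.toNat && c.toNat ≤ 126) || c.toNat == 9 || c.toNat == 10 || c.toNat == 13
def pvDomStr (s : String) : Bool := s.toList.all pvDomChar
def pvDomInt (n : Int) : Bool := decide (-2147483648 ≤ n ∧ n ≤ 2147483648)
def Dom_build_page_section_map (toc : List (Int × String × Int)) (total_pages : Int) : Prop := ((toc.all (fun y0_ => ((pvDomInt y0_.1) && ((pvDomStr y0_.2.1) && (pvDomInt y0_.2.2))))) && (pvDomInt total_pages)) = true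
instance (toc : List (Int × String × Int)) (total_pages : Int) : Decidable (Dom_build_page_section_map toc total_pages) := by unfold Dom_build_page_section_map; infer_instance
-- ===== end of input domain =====

-- B replaces A's per-page rescan of the whole TOC by a one-pass per-start-page
-- index of the last (and last level-1) entry plus a single sweep over the pages
-- carrying a running prefix-max of TOC indices (objective: faster).

-- ===== PORT A =====
def build_page_section_map (toc : List (Int × String × Int)) (total_pages : Int) : List (Int × String × String) :=
  if toc = [] then
    (PySem.List.pyRange 1 (total_pages + 1) 1).map (fun p => (p, "", ""))
  else
    -- normalize to (lvl, title, page), keeping only valid pages (tuples always have length 3 here)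
    let entries : List (Int × String × Int) := toc.foldl (fun acc item =>
      let lvl := item.1
      let title := PySem.Str.strip item.2.1
      let page := item.2.2
      if page < 1 ∨ page > total_pages then acc
      else acc ++ [(lvl, title, page)]) []
    (PySem.List.pyRange 1 (total_pages + 1) 1).foldl (fun res page_no =>
      let ct := entries.foldl (fun (st : String × String) e =>
        if e.2.2 ≤ page_no then ((if e.1 = 1 then e.2.1 else st.1), e.2.1) else st)
        ("", "")
      res ++ [(page_no, ct.1, ct.2)]) []

-- ===== PORT B =====
def build_page_section_map_alt (toc : List (Int × String × Int)) (total_pages : Int) : List (Int × String × String) :=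
  let dicts : PySem.Dict Int (Int × String) × PySem.Dict Int (Int × String) :=
    (PySem.List.enumerate toc 0).foldl (fun d ie =>
      let i := ie.1
      let lvl := ie.2.1
      let title := PySem.Str.strip ie.2.2.1
      let page := ie.2.2.2
      if 1 ≤ page ∧ page ≤ total_pages then
        (d.1.insert page (i, title),
         if lvl = 1 then d.2.insert page (i, title) else d.2)
      else d) (PySem.Dict.empty, PySem.Dict.empty)
  let r := (PySem.List.pyRange 1 (total_pages + 1) 1).foldl
    (fun (st : (Int × String) × (Int × String) × List (Int × String × String)) p =>
      let cs := match dicts.1.get? p with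
        | some v => if v.1 > st.1.1 then v else st.1
        | none => st.1
      let cc := match dicts.2.get? p with
        | some w => if w.1 > st.2.1.1 then w else st.2.1
        | none => st.2.1
      (cs, cc, st.2.2 ++ [(p, cc.2, cs.2)]))
    ((-1, ""), (-1, ""), [])
  r.2.2

-- ===== PRECONDITION & SPEC =====
def Spec_build_page_section_map (toc : List (Int × String × Int)) (total_pages : Int) (out : List (Int × String × String)) : Prop := out = build_page_section_map_alt toc total_pages
instance (toc : List (Int × String × Int)) (total_pages : Int) (out : List (Int × String × String)) : Decidable (Spec_build_page_section_map toc total_pages out) := by unfold Spec_build_page_section_map; infer_instance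

-- ===== CLAIM (what is proved, stated in full; the proofs are below) =====
def Claim_equal_build_page_section_map : Prop := ∀ (toc : List (Int × String × Int)) (total_pages : Int), Dom_build_page_section_map toc total_pages → Spec_build_page_section_map toc total_pages (build_page_section_map toc total_pages)

-- ===== LEMMAS AND PROOFS =====

-- normalization of one TOC entry, as both programs perform it
def pvNorm (e : Int × String × Int) : Int × String × Int := (e.1, PySem.Str.strip e.2.1, e.2.2)

-- the normalized valid entries of an (already enumerated) TOC, with their indices
def pvLIof (l : List (Int × (Int × String × Int))) (tp : Int) : List (Int × (Int × String × Int)) :=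
  (l.map (fun ie => (ie.1, pvNorm ie.2))).filter (fun ie => decide (1 ≤ ie.2.2.2 ∧ ie.2.2.2 ≤ tp))

-- sentinel encoding of an optional indexed entry, as B's running state holds it
def pvEnc : Option (Int × (Int × String × Int)) → Int × String
  | some ie => (ie.1, ie.2.2.1)
  | none => (-1, "")

-- last entry starting at page ≤ p / exactly at p
def pvLast (l : List (Int × (Int × String × Int))) (p : Int) : Option (Int × (Int × String × Int)) :=
  (l.filter (fun ie => decide (ie.2.2.2 ≤ p))).getLast?
def pvLastEq (l : List (Int × (Int × String × Int))) (p : Int) : Option (Int × (Int × String × Int)) :=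
  (l.filter (fun ie => ie.2.2.2 == p)).getLast?

def pvIns (d : PySem.Dict Int (Int × String)) (ie : Int × (Int × String × Int)) : PySem.Dict Int (Int × String) :=
  d.insert ie.2.2.2 (ie.1, ie.2.2.1)

-- B's sweep body, with the two lookup dicts as parameters
def pvF (d1 d2 : PySem.Dict Int (Int × String))
    (st : (Int × String) × (Int × String) × List (Int × String × String)) (p : Int) :
    (Int × String) × (Int × String) × List (Int × String × String) :=
  ((match d1.get? p with
     | some v => if v.1 > st.1.1 then v else st.1
     | none => st.1),
   (match d2.get? p with
     | some w => if w.1 > st.2.1.1 then w else st.2.1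
     | none => st.2.1),
   st.2.2 ++ [(p,
     (match d2.get? p with
       | some w => if w.1 > st.2.1.1 then w else st.2.1
       | none => st.2.1).2,
     (match d1.get? p with
       | some v => if v.1 > st.1.1 then v else st.1
       | none => st.1).2)])

-- A's entries loop builds exactly the valid normalized entries
lemma pv_entries (toc : List (Int × String × Int)) (tp : Int) (s : Int)
    (acc : List (Int × String × Int)) :
    toc.foldl (fun acc item =>
      let lvl := item.1
      let title := PySem.Str.strip item.2.1
      let page := item.2.2
      if page < 1 ∨ page > tp then acc else acc ++ [(lvl, title, page)]) acc
    = acc ++ (pvLIof (PySem.List.enumerate toc s) tp).map (fun ie => ie.2) := by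
  induction toc generalizing s acc with
  | nil => simp [pvLIof, PySem.List.enumerate_nil]
  | cons x xs ih =>
    rw [List.foldl_cons, PySem.List.enumerate_cons]
    by_cases h : 1 ≤ x.2.2 ∧ x.2.2 ≤ tp
    · have hA : ¬ (x.2.2 < 1 ∨ x.2.2 > tp) := by omega
      simp only [pvLIof, List.map_cons, List.filter_cons, if_neg hA]
      rw [ih (s + 1)]
      simp [pvLIof, pvNorm, h]
    · have hA : x.2.2 < 1 ∨ x.2.2 > tp := by omega
      simp only [pvLIof, List.map_cons, List.filter_cons, if_pos hA]
      rw [ih (s + 1)]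
      simp [pvLIof, pvNorm, h]

-- A's inner per-page fold computes the titles of the last matching entries
lemma pv_A1 (l : List (Int × (Int × String × Int))) (p : Int) (st : String × String) :
    l.foldl (fun st ie =>
        if ie.2.2.2 ≤ p then ((if ie.2.1 = 1 then ie.2.2.1 else st.1), ie.2.2.1) else st) st
    = (((pvLast (l.filter (fun ie => ie.2.1 == 1)) p).map (fun ie => ie.2.2.1)).getD st.1,
       ((pvLast l p).map (fun ie => ie.2.2.1)).getD st.2) := by
  induction l using List.reverseRecOn with
  | nil => simp [pvLast]
  | append_singleton l e ih =>
    rw [List.foldl_append, ih]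
    by_cases hle : e.2.2.2 ≤ p
    · by_cases h1 : e.2.1 = 1
      · simp [pvLast, List.filter_append, hle, h1]
      · simp [pvLast, List.filter_append, hle, h1]
    · simp [pvLast, List.filter_append, hle]

-- B's dict-building loop splits into two independent insert folds
lemma pv_split (tp : Int) (l : List (Int × (Int × String × Int)))
    (d1 d2 : PySem.Dict Int (Int × String)) :
    l.foldl (fun d ie =>
      let i := ie.1
      let lvl := ie.2.1
      let title := PySem.Str.strip ie.2.2.1
      let page := ie.2.2.2
      if 1 ≤ page ∧ page ≤ tp then
        (d.1.insert page (i, title),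
         if lvl = 1 then d.2.insert page (i, title) else d.2)
      else d) (d1, d2)
    = ((pvLIof l tp).foldl pvIns d1,
       ((pvLIof l tp).filter (fun ie => ie.2.1 == 1)).foldl pvIns d2) := by
  induction l generalizing d1 d2 with
  | nil => simp [pvLIof]
  | cons ie l ih =>
    rw [List.foldl_cons]
    by_cases h : 1 ≤ ie.2.2.2 ∧ ie.2.2.2 ≤ tp
    · by_cases h1 : ie.2.1 = 1
      · simp only [if_pos h, if_pos h1]
        rw [ih]
        simp [pvLIof, pvNorm, pvIns, h, h1]
      · simp only [if_pos h, if_neg h1]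
        rw [ih]
        simp [pvLIof, pvNorm, pvIns, h, h1]
    · simp only [if_neg h]
      rw [ih]
      simp [pvLIof, pvNorm, h]

-- lookup in a fold of inserts = last inserted value at that key
lemma pv_get (l : List (Int × (Int × String × Int))) (d : PySem.Dict Int (Int × String)) (q : Int) :
    (l.foldl pvIns d).get? q
    = (match pvLastEq l q with
       | some ie => some (ie.1, ie.2.2.1)
       | none => d.get? q) := by
  induction l using List.reverseRecOn generalizing d with
  | nil => simp [pvLastEq]
  | append_singleton l e ih =>
    rw [List.foldl_append, List.foldl_cons, List.foldl_nil]
    show (l.foldl pvIns d |>.insert e.2.2.2 (e.1, e.2.2.1)).get? q = _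
    rw [PySem.Dict.get?_insert, ih]
    by_cases hq : q = e.2.2.2
    · simp [pvLastEq, List.filter_append, hq]
    · have hne : (e.2.2.2 == q) = false := beq_eq_false_iff_ne.mpr (Ne.symm hq)
      simp [pvLastEq, List.filter_append, hq, hne]

-- prefix-max step: the last entry with page ≤ p is the index-max of
-- (last with page ≤ p-1) and (last with page = p), for index-sorted lists
lemma pv_merge (l : List (Int × (Int × String × Int)))
    (hpw : l.Pairwise (fun a b => a.1 < b.1)) (h0 : ∀ ie ∈ l, 0 ≤ ie.1) (p : Int) :
    pvEnc (pvLast l p)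
    = (match pvLastEq l p with
       | some ie => if ie.1 > (pvEnc (pvLast l (p - 1))).1 then (ie.1, ie.2.2.1)
                    else pvEnc (pvLast l (p - 1))
       | none => pvEnc (pvLast l (p - 1))) := by
  induction l using List.reverseRecOn with
  | nil => simp [pvLast, pvLastEq, pvEnc]
  | append_singleton l e ih =>
    have hpl : l.Pairwise (fun a b => a.1 < b.1) :=
      hpw.sublist (List.sublist_append_left l [e])
    have hlt : ∀ x ∈ l, x.1 < e.1 := by
      intro x hx
      exact (List.pairwise_append.mp hpw).2.2 x hx e (by simp)
    have h0l : ∀ ie ∈ l, 0 ≤ ie.1 := fun ie h => h0 ie (by simp [h])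
    have h0e : 0 ≤ e.1 := h0 e (by simp)
    -- anything previously selected from l has a smaller index than e
    have hsmall : ∀ (q : Int), (pvEnc (pvLast l q)).1 < e.1 := by
      intro q
      cases hc : pvLast l q with
      | none => simpa [pvEnc] using by omega
      | some x =>
        have hx : x ∈ l := List.mem_of_mem_filter (List.mem_of_getLast? hc)
        simpa [pvEnc] using hlt x hx
    by_cases hEq : e.2.2.2 = p
    · have hle : e.2.2.2 ≤ p := le_of_eq hEq
      have hle' : ¬ e.2.2.2 ≤ p - 1 := by omega
      have hA : decide (p ≤ p) = true := decide_eq_true (le_refl p)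
      have hB : decide (p ≤ p - 1) = false := decide_eq_false (by omega)
      simp only [pvLast, pvLastEq, List.filter_append, List.filter_cons,
        List.filter_nil, hEq, hA, hB, beq_self_eq_true, if_true,
        Bool.false_eq_true, if_false, List.append_nil, List.getLast?_concat]
      have hcond := hsmall (p - 1)
      split_ifs with hif
      · rfl
      · exact absurd hcond hif
    · by_cases hle : e.2.2.2 ≤ p
      · have hle' : e.2.2.2 ≤ p - 1 := by omega
        have hbeq : (e.2.2.2 == p) = false := beq_eq_false_iff_ne.mpr hEq
        simp only [pvLast, pvLastEq, List.filter_append, List.filter_cons,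
          List.filter_nil, hle, hle', decide_true, if_true, hbeq,
          Bool.false_eq_true, if_false, List.append_nil, List.getLast?_concat]
        cases hE : (l.filter (fun ie => ie.2.2.2 == p)).getLast? with
        | none => simp [pvEnc]
        | some x =>
          have hx : x ∈ l := List.mem_of_mem_filter (List.mem_of_getLast? hE)
          have hcond : ¬ x.1 > e.1 := by have := hlt x hx; omega
          simp only [pvEnc]
          rw [if_neg hcond]
      · have hle' : ¬ e.2.2.2 ≤ p - 1 := by omega
        have hbeq : (e.2.2.2 == p) = false := beq_eq_false_iff_ne.mpr hEq
        simp only [pvLast, pvLastEq, List.filter_append, List.filter_cons,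
          List.filter_nil, hle, hle', decide_false, Bool.false_eq_true,
          if_false, hbeq, List.append_nil]
        exact ih hpl h0l

-- the page sweep maintains the prefix-max state and emits the per-page titles
lemma pv_sweep (l1 l2 : List (Int × (Int × String × Int)))
    (hp1 : l1.Pairwise (fun a b => a.1 < b.1)) (hp2 : l2.Pairwise (fun a b => a.1 < b.1))
    (h01 : ∀ ie ∈ l1, 0 ≤ ie.1) (h02 : ∀ ie ∈ l2, 0 ≤ ie.1)
    (h11 : ∀ ie ∈ l1, 1 ≤ ie.2.2.2) (h12 : ∀ ie ∈ l2, 1 ≤ ie.2.2.2)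
    (d1 d2 : PySem.Dict Int (Int × String))
    (hd1 : ∀ q, d1.get? q = (match pvLastEq l1 q with
       | some ie => some (ie.1, ie.2.2.1) | none => none))
    (hd2 : ∀ q, d2.get? q = (match pvLastEq l2 q with
       | some ie => some (ie.1, ie.2.2.1) | none => none))
    (m : Nat) :
    (PySem.List.pyRange 1 (1 + (m : Int)) 1).foldl (pvF d1 d2) ((-1, ""), (-1, ""), [])
    = (pvEnc (pvLast l1 (m : Int)), pvEnc (pvLast l2 (m : Int)),
       (PySem.List.pyRange 1 (1 + (m : Int)) 1).map
         (fun q => (q, (pvEnc (pvLast l2 q)).2, (pvEnc (pvLast l1 q)).2))) := by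
  induction m with
  | zero =>
    have hnil : PySem.List.pyRange 1 (1 + ((0 : Nat) : Int)) 1 = [] :=
      PySem.List.pyRange_one_eq_nil (by norm_num)
    have hl1 : pvLast l1 ((0 : Nat) : Int) = none := by
      unfold pvLast
      rw [List.filter_eq_nil_iff.mpr, List.getLast?_nil]
      intro ie hie
      have := h11 ie hie
      simp only [Nat.cast_zero, decide_eq_true_eq]
      omega
    have hl2 : pvLast l2 ((0 : Nat) : Int) = none := by
      unfold pvLast
      rw [List.filter_eq_nil_iff.mpr, List.getLast?_nil]
      intro ie hie
      have := h12 ie hie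
      simp only [Nat.cast_zero, decide_eq_true_eq]
      omega
    rw [hnil, hl1, hl2]
    simp [pvEnc]
  | succ m ih =>
    have hc : (((m + 1 : Nat)) : Int) = 1 + (m : Int) := by push_cast; ring
    have hsplit : PySem.List.pyRange 1 (1 + (1 + (m : Int))) 1
        = PySem.List.pyRange 1 (1 + (m : Int)) 1 ++ [1 + (m : Int)] := by
      rw [show (1 + (1 + (m : Int))) = (1 + (m : Int)) + 1 by ring]
      exact PySem.List.pyRange_one_succ_right (by omega)
    have hm1 := pv_merge l1 hp1 h01 (1 + (m : Int))
    have hm2 := pv_merge l2 hp2 h02 (1 + (m : Int))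
    rw [show (1 + (m : Int)) - 1 = (m : Int) by ring] at hm1 hm2
    rw [hc, hsplit, List.foldl_append, ih, List.map_append]
    simp only [List.foldl_cons, List.foldl_nil, List.map_cons, List.map_nil]
    unfold pvF
    rw [hd1, hd2]
    cases hE1 : pvLastEq l1 (1 + (m : Int)) <;>
      cases hE2 : pvLastEq l2 (1 + (m : Int)) <;>
        simp only [hE1, hE2] at hm1 hm2 <;>
          simp only [hm1, hm2]

-- an append-accumulating fold is a map
lemma pv_out (l : List Int) (g : Int → Int × String × String) (init : List (Int × String × String)) :
    l.foldl (fun r p => r ++ [g p]) init = init ++ l.map g := by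
  induction l generalizing init with
  | nil => simp
  | cons x xs ih => simp [List.foldl_cons, ih]

-- sentinel encoding agrees with getD "" on the title component
lemma pv_enc_snd (o : Option (Int × (Int × String × Int))) :
    ((o.map (fun ie => ie.2.2.1)).getD "") = (pvEnc o).2 := by
  cases o <;> rfl

-- ===== VERDICT (by name: the statement is the Claim_ definition above) =====
theorem build_page_section_map_spec : Claim_equal_build_page_section_map := by
  intro toc tp _
  unfold Spec_build_page_section_map
  by_cases htp : tp ≤ 0
  · have hnil : PySem.List.pyRange 1 (tp + 1) 1 = [] :=
      PySem.List.pyRange_one_eq_nil (by omega)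
    unfold build_page_section_map build_page_section_map_alt
    by_cases h0 : toc = [] <;> simp [h0, hnil]
  -- tp ≥ 1
  set l1 := pvLIof (PySem.List.enumerate toc 0) tp with hl1def
  set l2 := l1.filter (fun ie => ie.2.1 == 1) with hl2def
  have hpe : (PySem.List.enumerate toc 0).Pairwise (fun a b => a.1 < b.1) :=
    PySem.List.pairwise_lt_enumerate toc 0
  have hp1 : l1.Pairwise (fun a b => a.1 < b.1) := by
    rw [hl1def]
    unfold pvLIof
    exact (hpe.map (fun ie : Int × (Int × String × Int) => (ie.1, pvNorm ie.2)) (fun a b h => h)).filter _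
  have hp2 : l2.Pairwise (fun a b => a.1 < b.1) := hp1.filter _
  have h01 : ∀ ie ∈ l1, 0 ≤ ie.1 := by
    intro ie hie
    rw [hl1def] at hie
    unfold pvLIof at hie
    have hmem := List.mem_of_mem_filter hie
    obtain ⟨je, hje, rfl⟩ := List.mem_map.mp hmem
    obtain ⟨k, hk, hp⟩ := (PySem.List.mem_enumerate_iff toc 0 je).mp hje
    subst hp
    simp
  have h02 : ∀ ie ∈ l2, 0 ≤ ie.1 := fun ie h => h01 ie (List.mem_of_mem_filter h)
  have h11 : ∀ ie ∈ l1, 1 ≤ ie.2.2.2 := by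
    intro ie hie
    rw [hl1def] at hie
    unfold pvLIof at hie
    exact (of_decide_eq_true (List.mem_filter.mp hie).2).1
  have h12 : ∀ ie ∈ l2, 1 ≤ ie.2.2.2 := fun ie h => h11 ie (List.mem_of_mem_filter h)
  have hd1 : ∀ q, ((l1.foldl pvIns PySem.Dict.empty).get? q)
      = (match pvLastEq l1 q with
         | some ie => some (ie.1, ie.2.2.1) | none => none) := by
    intro q
    rw [pv_get]
    cases pvLastEq l1 q <;> simp [PySem.Dict.get?_empty]
  have hd2 : ∀ q, ((l2.foldl pvIns PySem.Dict.empty).get? q)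
      = (match pvLastEq l2 q with
         | some ie => some (ie.1, ie.2.2.1) | none => none) := by
    intro q
    rw [pv_get]
    cases pvLastEq l2 q <;> simp [PySem.Dict.get?_empty]
  have hsweep := pv_sweep l1 l2 hp1 hp2 h01 h02 h11 h12
      (l1.foldl pvIns PySem.Dict.empty) (l2.foldl pvIns PySem.Dict.empty) hd1 hd2 tp.toNat
  rw [show (1 + ((tp.toNat : Nat) : Int)) = tp + 1 by omega] at hsweep
  rw [show ((tp.toNat : Nat) : Int) = tp by omega] at hsweep
  -- B as a map over the pages
  have hB : build_page_section_map_alt toc tp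
      = (PySem.List.pyRange 1 (tp + 1) 1).map
          (fun q => (q, (pvEnc (pvLast l2 q)).2, (pvEnc (pvLast l1 q)).2)) := by
    have hB0 : build_page_section_map_alt toc tp
        = ((PySem.List.pyRange 1 (tp + 1) 1).foldl
            (pvF
              ((PySem.List.enumerate toc 0).foldl (fun d ie =>
                let i := ie.1
                let lvl := ie.2.1
                let title := PySem.Str.strip ie.2.2.1
                let page := ie.2.2.2
                if 1 ≤ page ∧ page ≤ tp then
                  (d.1.insert page (i, title),
                   if lvl = 1 then d.2.insert page (i, title) else d.2)
                else d) (PySem.Dict.empty, PySem.Dict.empty)).1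
              ((PySem.List.enumerate toc 0).foldl (fun d ie =>
                let i := ie.1
                let lvl := ie.2.1
                let title := PySem.Str.strip ie.2.2.1
                let page := ie.2.2.2
                if 1 ≤ page ∧ page ≤ tp then
                  (d.1.insert page (i, title),
                   if lvl = 1 then d.2.insert page (i, title) else d.2)
                else d) (PySem.Dict.empty, PySem.Dict.empty)).2)
            ((-1, ""), (-1, ""), [])).2.2 := rfl
    rw [hB0, pv_split tp (PySem.List.enumerate toc 0) PySem.Dict.empty PySem.Dict.empty]
    rw [← hl1def, ← hl2def, hsweep]
  rw [hB]
  by_cases htoc : toc = []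
  · unfold build_page_section_map
    rw [if_pos htoc]
    apply List.map_congr_left
    intro q _
    have hl1nil : l1 = [] := by
      rw [hl1def, htoc]
      rfl
    have hl2nil : l2 = [] := by rw [hl2def, hl1nil]; rfl
    simp [hl1nil, hl2nil, pvLast, pvEnc]
  · have hA0 : build_page_section_map toc tp
        = if toc = [] then
            (PySem.List.pyRange 1 (tp + 1) 1).map (fun p => (p, "", ""))
          else
            (PySem.List.pyRange 1 (tp + 1) 1).foldl (fun res page_no =>
              res ++ [(page_no,
                ((toc.foldl (fun acc item =>
                    let lvl := item.1
                    let title := PySem.Str.strip item.2.1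
                    let page := item.2.2
                    if page < 1 ∨ page > tp then acc
                    else acc ++ [(lvl, title, page)]) []).foldl
                  (fun (st : String × String) e =>
                    if e.2.2 ≤ page_no then ((if e.1 = 1 then e.2.1 else st.1), e.2.1) else st)
                  ("", "")).1,
                ((toc.foldl (fun acc item =>
                    let lvl := item.1
                    let title := PySem.Str.strip item.2.1
                    let page := item.2.2
                    if page < 1 ∨ page > tp then acc
                    else acc ++ [(lvl, title, page)]) []).foldl
                  (fun (st : String × String) e =>
                    if e.2.2 ≤ page_no then ((if e.1 = 1 then e.2.1 else st.1), e.2.1) else st)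
                  ("", "")).2)]) [] := rfl
    rw [hA0, if_neg htoc, pv_out]
    rw [List.nil_append]
    apply List.map_congr_left
    intro p _
    rw [pv_entries toc tp 0 [], List.nil_append, ← hl1def]
    simp only [List.foldl_map]
    rw [pv_A1]
    simp only [pv_enc_snd, ← hl2def]
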